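-- pv_equiv track=rewrite | github.com/sitmun/sitmun-admin-app | scripts/translation_tool.py | detect_missing_keys
-- ===== SOURCE A (Python) =====
-- from typing import Dict, List, Set, Tuple
--
-- def detect_missing_keys(translations: Dict[str, Dict[str, str]]) -> Dict[str, Dict[str, List[str]]]:
--     """
--     Detect keys that are missing across language files.
--
--     Args:
--         translations: Dictionary mapping language codes to translation dictionaries
--
--     Returns:
--         Dictionary mapping language codes to dictionaries of missing keys by source language
--     """
--     # Get all unique keys from all languages
--     all_keys = set()
--     for lang_data in translations.values():
--         all_keys.update(lang_data.keys())
--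
--     missing_keys = {}
--     for lang_code in translations.keys():
--         missing_keys[lang_code] = {}
--         lang_keys = set(translations[lang_code].keys())
--
--         for other_lang, other_keys in translations.items():
--             if other_lang == lang_code:
--                 continue
--             missing = other_keys.keys() - lang_keys
--             if missing:
--                 missing_keys[lang_code][other_lang] = sorted(missing)
--
--     return missing_keys
-- ===== SOURCE B (Python) =====
-- def detect_missing_keys(translations):
--     # Inverted index: key -> list of languages (in insertion order) that contain it.
--     index = {}
--     for lang, data in translations.items():
--         for k in data:
--             index.setdefault(k, []).append(lang)
--     result = {}
--     for lang in translations: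
--         # One scan of the index: bucket every key absent from `lang`
--         # under each language that does have it.
--         buckets = {}
--         for k, present in index.items():
--             if lang not in present:
--                 for other in present:
--                     buckets.setdefault(other, []).append(k)
--         result[lang] = {other: sorted(buckets[other])
--                         for other in translations if other in buckets}
--     return result
-- ===== Notes on version B (the rewrite author's own statement) =====
-- stated objective: alternative
-- what changed: Builds an inverted index (key -> languages containing it) once; for each language a single scan of that index buckets its missing keys by source language, replacing A's per-language-pair key-set differences.
import Mathlib
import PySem

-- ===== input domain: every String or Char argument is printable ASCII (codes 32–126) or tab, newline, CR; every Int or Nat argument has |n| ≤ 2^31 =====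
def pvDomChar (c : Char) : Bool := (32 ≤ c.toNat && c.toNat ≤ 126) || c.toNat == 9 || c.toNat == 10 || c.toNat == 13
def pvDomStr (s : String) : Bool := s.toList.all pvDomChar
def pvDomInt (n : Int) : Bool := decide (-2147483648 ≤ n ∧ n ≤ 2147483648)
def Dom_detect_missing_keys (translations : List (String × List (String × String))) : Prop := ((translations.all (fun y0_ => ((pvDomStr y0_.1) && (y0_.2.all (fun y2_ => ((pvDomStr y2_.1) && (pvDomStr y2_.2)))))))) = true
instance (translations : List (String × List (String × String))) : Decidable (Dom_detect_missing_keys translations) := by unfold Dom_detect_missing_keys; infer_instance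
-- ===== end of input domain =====

-- B computes the same missing-key tables from an inverted index (key -> languages containing it)
-- instead of A's per-pair set differences; same output, alternative data structure.

-- ===== PORT A =====
-- inner loop of A: for other_lang, other_keys in translations.items(): …
def dmkAInner (translations : List (String × List (String × String)))
    (langCode : String) (langKeys : PySem.Set String) : List (String × List String) :=
  translations.foldl (fun inn p =>
    if p.1 == langCode then inn
    else
      let missing := PySem.Set.diff (PySem.Set.ofList (p.2.map Prod.fst)) langKeys
      if missing = [] then inn
      else inn ++ [(p.1, PySem.List.sorted missing (fun x => x) false)]) []

def detect_missing_keys (translations : List (String × List (String × String))) : List (String × List (String × List String)) :=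
  -- all_keys is computed by A but never used
  let _all_keys : PySem.Set String :=
    translations.foldl (fun s p => PySem.Set.update s (p.2.map Prod.fst)) PySem.Set.empty
  translations.foldl (fun acc p =>
    acc ++ [(p.1, dmkAInner translations p.1 (PySem.Set.ofList (p.2.map Prod.fst)))]) []

-- ===== PORT B =====
-- index = {}; for lang, data in translations.items(): for k in data: index.setdefault(k, []).append(lang)
def dmkIndex (translations : List (String × List (String × String))) : PySem.Dict String (List String) :=
  translations.foldl (fun d p =>
    p.2.foldl (fun d q => d.modify q.1 [] (· ++ [p.1])) d) PySem.Dict.empty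

-- buckets = {}; for k, present in index.items(): if lang not in present: for other in present: buckets.setdefault(other, []).append(k)
def dmkBuckets (index : PySem.Dict String (List String)) (langCode : String) : PySem.Dict String (List String) :=
  index.items.foldl (fun b kp =>
    if kp.2.contains langCode then b
    else kp.2.foldl (fun b o => b.modify o [] (· ++ [kp.1])) b) PySem.Dict.empty

-- {other: sorted(buckets[other]) for other in translations if other in buckets}
def dmkBInner (index : PySem.Dict String (List String))
    (translations : List (String × List (String × String))) (langCode : String) : List (String × List String) :=
  let buckets := dmkBuckets index langCode
  translations.foldl (fun inn q =>
    if buckets.contains q.1 then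
      inn ++ [(q.1, PySem.List.sorted (buckets.getD q.1 []) (fun x => x) false)]
    else inn) []

def detect_missing_keys_alt (translations : List (String × List (String × String))) : List (String × List (String × List String)) :=
  let index := dmkIndex translations
  translations.foldl (fun res p =>
    res ++ [(p.1, dmkBInner index translations p.1)]) []

-- ===== PRECONDITION & SPEC =====
-- Pre_: the assoc lists stand for Python dicts (A's parameter type), so language codes and
-- the keys inside each language are pairwise distinct; the harness only produces such lists.
def Pre_detect_missing_keys (translations : List (String × List (String × String))) : Prop :=
  (translations.map Prod.fst).Nodup ∧ ∀ p ∈ translations, (p.2.map Prod.fst).Nodup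
instance (translations : List (String × List (String × String))) : Decidable (Pre_detect_missing_keys translations) := by unfold Pre_detect_missing_keys; infer_instance

def pvWitness_detect_missing_keys : (List (String × List (String × String))) :=
  [("en", [("a", "1"), ("b", "2")]), ("fr", [("a", "3")])]

def Spec_detect_missing_keys (translations : List (String × List (String × String))) (out : List (String × List (String × List String))) : Prop := out = detect_missing_keys_alt translations
instance (translations : List (String × List (String × String))) (out : List (String × List (String × List String))) : Decidable (Spec_detect_missing_keys translations out) := by unfold Spec_detect_missing_keys; infer_instance

-- ===== CLAIM (what is proved, stated in full; the proofs are below) =====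
def Claim_equal_detect_missing_keys : Prop := ∀ (translations : List (String × List (String × String))), Dom_detect_missing_keys translations → Pre_detect_missing_keys translations → Spec_detect_missing_keys translations (detect_missing_keys translations)

-- ===== LEMMAS AND PROOFS =====

-- the (key, language) pairs the index loop inserts, flattened
def dmkFlat (t : List (String × List (String × String))) : List (String × String) :=
  t.flatMap (fun p => p.2.map (fun q => (q.1, p.1)))

-- the (other-language, key) pairs the bucket loop inserts, flattened
def dmkBFlat (index : PySem.Dict String (List String)) (langCode : String) : List (String × String) :=
  (index.items.filter (fun kp => !kp.2.contains langCode)).flatMap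
    (fun kp => kp.2.map (fun o => (o, kp.1)))

theorem dict_contains_iff (d : PySem.Dict String (List String)) (k : String) :
    d.contains k = true ↔ k ∈ d.keys := by
  simp [PySem.Dict.contains, PySem.Dict.keys]

theorem dmkIndex_eq_flat_aux (t : List (String × List (String × String)))
    (d : PySem.Dict String (List String)) :
    t.foldl (fun d p => p.2.foldl (fun d q => d.modify q.1 [] (· ++ [p.1])) d) d
      = (dmkFlat t).foldl (fun d e => d.modify e.1 [] (· ++ [e.2])) d := by
  induction t generalizing d with
  | nil => rfl
  | cons p rest ih =>
    simp only [dmkFlat, List.flatMap_cons, List.foldl_cons, List.foldl_append, List.foldl_map]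
    rw [ih]
    rfl

theorem dmkIndex_eq_flat (t : List (String × List (String × String))) :
    dmkIndex t = (dmkFlat t).foldl (fun d e => d.modify e.1 [] (· ++ [e.2])) PySem.Dict.empty :=
  dmkIndex_eq_flat_aux t PySem.Dict.empty

theorem getD_dmkIndex (t : List (String × List (String × String))) (k : String) :
    (dmkIndex t).getD k [] = ((dmkFlat t).filter (fun e => e.1 == k)).map (fun e => e.2) := by
  rw [dmkIndex_eq_flat, PySem.Dict.getD_foldl_modify_append]
  rfl

theorem keys_dmkIndex (t : List (String × List (String × String))) :
    (dmkIndex t).keys = PySem.Set.ofList ((dmkFlat t).map Prod.fst) := by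
  rw [dmkIndex_eq_flat,
    PySem.Dict.keys_foldl_modify_key (dmkFlat t) Prod.fst [] (fun _ e => (· ++ [e.2])) PySem.Dict.empty,
    PySem.Set.ofList_eq_foldl]
  rfl

theorem nodup_keys_dmkIndex (t : List (String × List (String × String))) :
    (dmkIndex t).keys.Nodup := by
  rw [dmkIndex_eq_flat]
  exact PySem.Dict.nodup_keys_foldl_modify_key (dmkFlat t) Prod.fst [] (fun _ e => (· ++ [e.2]))
    PySem.Dict.empty List.nodup_nil

theorem mem_dmkFlat (t : List (String × List (String × String))) (k L : String) :
    (k, L) ∈ dmkFlat t ↔ ∃ p ∈ t, p.1 = L ∧ k ∈ p.2.map Prod.fst := by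
  simp only [dmkFlat, List.mem_flatMap, List.mem_map, Prod.mk.injEq]
  constructor
  · rintro ⟨p, hp, q, hq, rfl, rfl⟩
    exact ⟨p, hp, rfl, ⟨q, hq, rfl⟩⟩
  · rintro ⟨p, hp, rfl, q, hq, rfl⟩
    exact ⟨p, hp, q, hq, rfl, rfl⟩

theorem mem_dmkFlat_unique (t : List (String × List (String × String)))
    (hnd : (t.map Prod.fst).Nodup) (k : String)
    (q : String × List (String × String)) (hq : q ∈ t) :
    (k, q.1) ∈ dmkFlat t ↔ k ∈ q.2.map Prod.fst := by
  rw [mem_dmkFlat]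
  constructor
  · rintro ⟨p, hp, hfst, hk⟩
    have : p = q := List.inj_on_of_nodup_map hnd hp hq hfst
    subst this
    exact hk
  · intro hk
    exact ⟨q, hq, rfl, hk⟩

theorem contains_getD_dmkIndex (t : List (String × List (String × String)))
    (hnd : (t.map Prod.fst).Nodup) (k : String)
    (q : String × List (String × String)) (hq : q ∈ t) :
    (((dmkIndex t).getD k []).contains q.1 = true) ↔ k ∈ q.2.map Prod.fst := by
  rw [getD_dmkIndex]
  simp only [List.contains_iff_mem]
  constructor
  · intro h
    obtain ⟨e, he, h2⟩ := List.mem_map.1 h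
    obtain ⟨hef, h1⟩ := List.mem_filter.1 he
    have h1' : e.1 = k := by simpa using h1
    have : (k, q.1) ∈ dmkFlat t := by
      have he2 : e = (k, q.1) := Prod.ext h1' h2
      rw [← he2]; exact hef
    exact (mem_dmkFlat_unique t hnd k q hq).1 this
  · intro hk
    have hf := (mem_dmkFlat_unique t hnd k q hq).2 hk
    exact List.mem_map.2 ⟨(k, q.1), List.mem_filter.2 ⟨hf, by simp⟩, rfl⟩

theorem nodup_dmkFlat (t : List (String × List (String × String)))
    (hnd : (t.map Prod.fst).Nodup)
    (hin : ∀ p ∈ t, (p.2.map Prod.fst).Nodup) :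
    (dmkFlat t).Nodup := by
  induction t with
  | nil => exact List.nodup_nil
  | cons p rest ih =>
    have hnd' : (rest.map Prod.fst).Nodup := (List.nodup_cons.1 (by simpa using hnd)).2
    have hhead : p.1 ∉ rest.map Prod.fst := (List.nodup_cons.1 (by simpa using hnd)).1
    simp only [dmkFlat, List.flatMap_cons]
    apply List.Nodup.append
    · have h2 : (p.2.map Prod.fst).Nodup := hin p (List.mem_cons_self ..)
      have heq : p.2.map (fun q => (q.1, p.1)) = (p.2.map Prod.fst).map (fun x => (x, p.1)) := by
        simp [List.map_map]
      rw [heq]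
      exact h2.map (fun a b h => congrArg Prod.fst h)
    · exact ih hnd' (fun q hq => hin q (List.mem_cons_of_mem p hq))
    · intro e he1 he2
      obtain ⟨q, _, rfl⟩ := List.mem_map.1 he1
      obtain ⟨p', hp', h1, _⟩ := (mem_dmkFlat rest q.1 p.1).1 he2
      exact hhead (List.mem_map.2 ⟨p', hp', h1⟩)

theorem nodup_getD_dmkIndex (t : List (String × List (String × String)))
    (hnd : (t.map Prod.fst).Nodup)
    (hin : ∀ p ∈ t, (p.2.map Prod.fst).Nodup) (k : String) :
    ((dmkIndex t).getD k []).Nodup := by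
  rw [getD_dmkIndex]
  refine List.Nodup.map_on ?_ ((nodup_dmkFlat t hnd hin).sublist List.filter_sublist)
  intro x hx y hy hxy
  have hx1 : x.1 = k := by simpa using (List.mem_filter.1 hx).2
  have hy1 : y.1 = k := by simpa using (List.mem_filter.1 hy).2
  exact Prod.ext (hx1.trans hy1.symm) hxy

theorem mem_items_dmkIndex (t : List (String × List (String × String)))
    (kp : String × List String) :
    kp ∈ (dmkIndex t).items ↔ kp.1 ∈ (dmkIndex t).keys ∧ kp.2 = (dmkIndex t).getD kp.1 [] := by
  obtain ⟨a, b⟩ := kp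
  rw [PySem.Dict.items_eq_map_keys (dmkIndex t) (nodup_keys_dmkIndex t) []]
  simp only [List.mem_map, Prod.mk.injEq]
  constructor
  · rintro ⟨k, hk, rfl, rfl⟩
    exact ⟨hk, rfl⟩
  · rintro ⟨h1, h2⟩
    exact ⟨a, h1, rfl, h2.symm⟩

theorem dmkBuckets_eq_flat_aux (items : List (String × List String)) (langCode : String)
    (b : PySem.Dict String (List String)) :
    items.foldl (fun b kp =>
        if kp.2.contains langCode then b
        else kp.2.foldl (fun b o => b.modify o [] (· ++ [kp.1])) b) b
      = ((items.filter (fun kp => !kp.2.contains langCode)).flatMap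
          (fun kp => kp.2.map (fun o => (o, kp.1)))).foldl
          (fun b e => b.modify e.1 [] (· ++ [e.2])) b := by
  induction items generalizing b with
  | nil => rfl
  | cons kp rest ih =>
    by_cases h : kp.2.contains langCode = true
    · rw [List.foldl_cons, List.filter_cons, if_pos h, if_neg (by rw [h]; decide)]
      exact ih b
    · have h' : kp.2.contains langCode = false := by
        rcases hb : kp.2.contains langCode with _ | _
        · rfl
        · exact absurd hb h
      rw [List.foldl_cons, List.filter_cons, if_neg (by rw [h']; decide), if_pos (by rw [h']; decide)]
      rw [List.flatMap_cons, List.foldl_append, List.foldl_map]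
      rw [ih]

theorem dmkBuckets_eq_flat (index : PySem.Dict String (List String)) (langCode : String) :
    dmkBuckets index langCode
      = (dmkBFlat index langCode).foldl (fun b e => b.modify e.1 [] (· ++ [e.2])) PySem.Dict.empty :=
  dmkBuckets_eq_flat_aux index.items langCode PySem.Dict.empty

theorem getD_dmkBuckets (index : PySem.Dict String (List String)) (langCode o : String) :
    (dmkBuckets index langCode).getD o []
      = ((dmkBFlat index langCode).filter (fun e => e.1 == o)).map (fun e => e.2) := by
  rw [dmkBuckets_eq_flat, PySem.Dict.getD_foldl_modify_append]
  rfl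

theorem keys_dmkBuckets (index : PySem.Dict String (List String)) (langCode : String) :
    (dmkBuckets index langCode).keys = PySem.Set.ofList ((dmkBFlat index langCode).map Prod.fst) := by
  rw [dmkBuckets_eq_flat,
    PySem.Dict.keys_foldl_modify_key (dmkBFlat index langCode) Prod.fst [] (fun _ e => (· ++ [e.2]))
      PySem.Dict.empty,
    PySem.Set.ofList_eq_foldl]
  rfl

theorem contains_dmkBuckets_iff (index : PySem.Dict String (List String)) (langCode o : String) :
    (dmkBuckets index langCode).contains o = true ↔ (dmkBuckets index langCode).getD o [] ≠ [] := by
  rw [dict_contains_iff, keys_dmkBuckets, getD_dmkBuckets, PySem.Set.mem_ofList]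
  simp only [List.mem_map]
  constructor
  · rintro ⟨e, he, rfl⟩ hnil
    rw [List.map_eq_nil_iff, List.filter_eq_nil_iff] at hnil
    exact hnil e he (by simp)
  · intro h
    by_contra hno
    apply h
    rw [List.map_eq_nil_iff, List.filter_eq_nil_iff]
    intro e he hbeq
    exact hno ⟨e, he, by simpa using hbeq⟩

theorem mem_dmkBFlat (index : PySem.Dict String (List String)) (langCode o k : String) :
    (o, k) ∈ dmkBFlat index langCode
      ↔ ∃ kp ∈ index.items, kp.2.contains langCode = false ∧ o ∈ kp.2 ∧ kp.1 = k := by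
  simp only [dmkBFlat, List.mem_flatMap, List.mem_filter, List.mem_map, Prod.mk.injEq]
  constructor
  · rintro ⟨kp, ⟨hkp, hc⟩, x, hx, rfl, rfl⟩
    exact ⟨kp, hkp, by simpa using hc, hx, rfl⟩
  · rintro ⟨kp, hkp, hc, ho, rfl⟩
    exact ⟨kp, ⟨hkp, by simpa using hc⟩, o, ho, rfl, rfl⟩

theorem contains_dmkBuckets_self (index : PySem.Dict String (List String)) (langCode : String) :
    (dmkBuckets index langCode).contains langCode = false := by
  rw [← Bool.not_eq_true, dict_contains_iff, keys_dmkBuckets, PySem.Set.mem_ofList]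
  intro h
  obtain ⟨e, he, hfst⟩ := List.mem_map.1 h
  have he' : (e.1, e.2) ∈ dmkBFlat index langCode := he
  rw [hfst] at he'
  obtain ⟨kp, _, hc, ho, _⟩ := (mem_dmkBFlat index langCode langCode e.2).1 he'
  rw [← List.contains_iff_mem] at ho
  rw [hc] at ho
  cases ho

theorem nodup_pairflat (l : List (String × List String))
    (h1 : (l.map Prod.fst).Nodup) (h2 : ∀ kp ∈ l, kp.2.Nodup) :
    (l.flatMap (fun kp => kp.2.map (fun o => (o, kp.1)))).Nodup := by
  induction l with
  | nil => exact List.nodup_nil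
  | cons kp rest ih =>
    have hnd' : (rest.map Prod.fst).Nodup := (List.nodup_cons.1 (by simpa using h1)).2
    have hhead : kp.1 ∉ rest.map Prod.fst := (List.nodup_cons.1 (by simpa using h1)).1
    simp only [List.flatMap_cons]
    apply List.Nodup.append
    · exact (h2 kp (List.mem_cons_self ..)).map (fun a b h => congrArg Prod.fst h)
    · exact ih hnd' (fun q hq => h2 q (List.mem_cons_of_mem kp hq))
    · intro e he1 he2
      obtain ⟨x, _, rfl⟩ := List.mem_map.1 he1
      obtain ⟨kp', hkp', hy⟩ := List.mem_flatMap.1 he2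
      obtain ⟨y, _, hy2⟩ := List.mem_map.1 hy
      exact hhead (List.mem_map.2 ⟨kp', hkp', congrArg Prod.snd hy2⟩)

theorem nodup_dmkBFlat (t : List (String × List (String × String)))
    (hnd : (t.map Prod.fst).Nodup)
    (hin : ∀ p ∈ t, (p.2.map Prod.fst).Nodup) (langCode : String) :
    (dmkBFlat (dmkIndex t) langCode).Nodup := by
  unfold dmkBFlat
  apply nodup_pairflat
  · have hsub : List.Sublist
        (((dmkIndex t).items.filter (fun kp => !kp.2.contains langCode)).map Prod.fst)
        ((dmkIndex t).items.map Prod.fst) := List.Sublist.map Prod.fst List.filter_sublist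
    have hk : ((dmkIndex t).items.map Prod.fst).Nodup := nodup_keys_dmkIndex t
    exact hk.sublist hsub
  · intro kp hkp
    have hmem := (List.mem_filter.1 hkp).1
    have h2 := ((mem_items_dmkIndex t kp).1 hmem).2
    rw [h2]
    exact nodup_getD_dmkIndex t hnd hin kp.1

theorem nodup_getD_dmkBuckets (t : List (String × List (String × String)))
    (hnd : (t.map Prod.fst).Nodup)
    (hin : ∀ p ∈ t, (p.2.map Prod.fst).Nodup) (langCode o : String) :
    ((dmkBuckets (dmkIndex t) langCode).getD o []).Nodup := by
  rw [getD_dmkBuckets]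
  refine List.Nodup.map_on ?_ ((nodup_dmkBFlat t hnd hin langCode).sublist List.filter_sublist)
  intro x hx y hy hxy
  have hx1 : x.1 = o := by simpa using (List.mem_filter.1 hx).2
  have hy1 : y.1 = o := by simpa using (List.mem_filter.1 hy).2
  exact Prod.ext (hx1.trans hy1.symm) hxy

theorem mem_getD_dmkBuckets (t : List (String × List (String × String)))
    (hnd : (t.map Prod.fst).Nodup)
    (p q : String × List (String × String)) (hp : p ∈ t) (hq : q ∈ t) (k : String) :
    k ∈ (dmkBuckets (dmkIndex t) p.1).getD q.1 []
      ↔ k ∈ q.2.map Prod.fst ∧ k ∉ p.2.map Prod.fst := by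
  rw [getD_dmkBuckets]
  have hstep : k ∈ ((dmkBFlat (dmkIndex t) p.1).filter (fun e => e.1 == q.1)).map (fun e => e.2)
      ↔ (q.1, k) ∈ dmkBFlat (dmkIndex t) p.1 := by
    simp only [List.mem_map, List.mem_filter, beq_iff_eq]
    constructor
    · rintro ⟨⟨e1, e2⟩, ⟨he, h1⟩, h2⟩
      simp only at h1 h2
      subst h1; subst h2
      exact he
    · intro h
      exact ⟨(q.1, k), ⟨h, rfl⟩, rfl⟩
  rw [hstep, mem_dmkBFlat]
  constructor
  · rintro ⟨kp, hkp, hc, ho, rfl⟩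
    have h2 := ((mem_items_dmkIndex t kp).1 hkp).2
    rw [h2] at hc ho
    have hqm : kp.1 ∈ q.2.map Prod.fst :=
      (contains_getD_dmkIndex t hnd kp.1 q hq).1 (by rw [List.contains_iff_mem]; simpa using ho)
    have hpm : kp.1 ∉ p.2.map Prod.fst := by
      intro hmemp
      have := (contains_getD_dmkIndex t hnd kp.1 p hp).2 hmemp
      rw [hc] at this
      cases this
    exact ⟨hqm, hpm⟩
  · rintro ⟨hqm, hpm⟩
    have hcq := (contains_getD_dmkIndex t hnd k q hq).2 hqm
    have hcp : ((dmkIndex t).getD k []).contains p.1 = false := by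
      rcases hb : ((dmkIndex t).getD k []).contains p.1 with _ | _
      · rfl
      · exact absurd ((contains_getD_dmkIndex t hnd k p hp).1 hb) hpm
    have hkkeys : k ∈ (dmkIndex t).keys := by
      rw [keys_dmkIndex, PySem.Set.mem_ofList]
      have : (k, q.1) ∈ dmkFlat t := (mem_dmkFlat_unique t hnd k q hq).2 hqm
      exact List.mem_map.2 ⟨(k, q.1), this, rfl⟩
    refine ⟨(k, (dmkIndex t).getD k []), (mem_items_dmkIndex t _).2 ⟨hkkeys, rfl⟩, hcp, ?_, rfl⟩
    rw [← List.contains_iff_mem] at *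
    exact hcq

theorem bucket_eq_diff_sorted (t : List (String × List (String × String)))
    (hnd : (t.map Prod.fst).Nodup)
    (hin : ∀ p ∈ t, (p.2.map Prod.fst).Nodup)
    (p q : String × List (String × String)) (hp : p ∈ t) (hq : q ∈ t) :
    PySem.List.sorted
        (PySem.Set.diff (PySem.Set.ofList (q.2.map Prod.fst)) (PySem.Set.ofList (p.2.map Prod.fst)))
        (fun x => x) false
      = PySem.List.sorted ((dmkBuckets (dmkIndex t) p.1).getD q.1 []) (fun x => x) false := by
  set X := PySem.Set.diff (PySem.Set.ofList (q.2.map Prod.fst)) (PySem.Set.ofList (p.2.map Prod.fst)) with hX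
  set M := (dmkBuckets (dmkIndex t) p.1).getD q.1 [] with hM
  have hNX : X.Nodup := (PySem.Set.nodup_ofList (q.2.map Prod.fst)).filter _
  have hNM : M.Nodup := nodup_getD_dmkBuckets t hnd hin p.1 q.1
  have hmem : ∀ x, x ∈ X ↔ x ∈ M := by
    intro x
    have hxX : x ∈ X ↔ x ∈ q.2.map Prod.fst ∧ x ∉ p.2.map Prod.fst := by
      rw [hX]
      simp [PySem.Set.diff, List.mem_filter, PySem.Set.mem_ofList]
    rw [hxX, hM]
    exact (mem_getD_dmkBuckets t hnd p q hp hq x).symm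
  have hperm : X.Perm M := (List.perm_ext_iff_of_nodup hNX hNM).2 hmem
  have hZperm := PySem.List.sorted_perm X (fun x => x) false
  have hZnd : (PySem.List.sorted X (fun x => x) false).Nodup := hZperm.nodup_iff.2 hNX
  have hZle := PySem.List.sorted_pairwise X (fun x => x)
  have hZlt : (PySem.List.sorted X (fun x => x) false).Pairwise (fun a b => a < b) :=
    (hZle.and hZnd).imp (fun ⟨a, b⟩ => lt_of_le_of_ne a b)
  exact (PySem.List.sorted_eq_of_perm_of_pairwise_lt M
    (PySem.List.sorted X (fun x => x) false) (fun x => x) (hZperm.trans hperm) hZlt).symm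

theorem inner_eq (t : List (String × List (String × String)))
    (hnd : (t.map Prod.fst).Nodup)
    (hin : ∀ p ∈ t, (p.2.map Prod.fst).Nodup)
    (p : String × List (String × String)) (hp : p ∈ t) :
    dmkAInner t p.1 (PySem.Set.ofList (p.2.map Prod.fst))
      = dmkBInner (dmkIndex t) t p.1 := by
  unfold dmkAInner dmkBInner
  apply PySem.List.foldl_congr_mem
  intro acc q hq
  by_cases hqe : q.1 = p.1
  · have hc := contains_dmkBuckets_self (dmkIndex t) p.1
    simp [hqe, hc]
  · have hqe' : (q.1 == p.1) = false := by simpa using hqe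
    simp only [hqe', Bool.false_eq_true, if_false]
    have hms := bucket_eq_diff_sorted t hnd hin p q hp hq
    set X := PySem.Set.diff (PySem.Set.ofList (q.2.map Prod.fst)) (PySem.Set.ofList (p.2.map Prod.fst)) with hXd
    set M := (dmkBuckets (dmkIndex t) p.1).getD q.1 [] with hMd
    have hXM : X = [] ↔ M = [] := by
      constructor
      · intro h
        have hsm : PySem.List.sorted M (fun x => x) false = [] := by rw [← hms, h]; rfl
        have hperm := (PySem.List.sorted_perm M (fun x => x) false).symm
        rw [hsm] at hperm
        exact hperm.eq_nil
      · intro h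
        have hsx : PySem.List.sorted X (fun x => x) false = [] := by rw [hms, h]; rfl
        have hperm := (PySem.List.sorted_perm X (fun x => x) false).symm
        rw [hsx] at hperm
        exact hperm.eq_nil
    by_cases hN : X = []
    · have hM : M = [] := hXM.1 hN
      have hcont : (dmkBuckets (dmkIndex t) p.1).contains q.1 = false := by
        rcases hb : (dmkBuckets (dmkIndex t) p.1).contains q.1 with _ | _
        · rfl
        · exact absurd hM ((contains_dmkBuckets_iff (dmkIndex t) p.1 q.1).1 hb)
      simp [hN, hcont]
    · have hM : M ≠ [] := fun h => hN (hXM.2 h)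
      have hcont : (dmkBuckets (dmkIndex t) p.1).contains q.1 = true :=
        (contains_dmkBuckets_iff (dmkIndex t) p.1 q.1).2 hM
      simp [hN, hcont, hms]

-- ===== VERDICT (by name: the statement is the Claim_ definition above) =====
theorem detect_missing_keys_spec : Claim_equal_detect_missing_keys := by
  intro translations _hdom hpre
  unfold Spec_detect_missing_keys
  obtain ⟨hnd, hin⟩ := hpre
  unfold detect_missing_keys detect_missing_keys_alt
  rw [PySem.List.foldl_append_singleton_eq_map, PySem.List.foldl_append_singleton_eq_map]
  exact List.map_congr_left (fun p hp => by rw [inner_eq translations hnd hin p hp])
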